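-- pv_equiv track=rewrite | github.com/avivfaraj/Data-Structures-and-Algorithms | Algorithms/Searching/LinearSearch.py | recursive_iteration
-- ===== SOURCE A (Python) =====
-- from typing import List, Optional, Generator
--
-- def recursive_iteration(arr: List[int],
--                         item: int,
--                         start: int,
--                         stop: int) -> Optional[int]:
--
--     if start > stop:
--         return None
--
--     if item == arr[start]:
--         return start
--
--     return recursive_iteration(arr, item, start + 1, stop)
-- ===== SOURCE B (Python) =====
-- from typing import List, Optional
--
--
-- def recursive_iteration(arr: List[int],
--                         item: int,
--                         start: int,
--                         stop: int) -> Optional[int]: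
--     for i in range(start, stop + 1):
--         if arr[i] == item:
--             return i
--     return None
-- ===== Notes on version B (the rewrite author's own statement) =====
-- stated objective: simpler
-- what changed: Replaced the recursion-per-element with a flat iterative for-loop over range(start, stop+1) that returns the index at the first match.
import Mathlib
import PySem

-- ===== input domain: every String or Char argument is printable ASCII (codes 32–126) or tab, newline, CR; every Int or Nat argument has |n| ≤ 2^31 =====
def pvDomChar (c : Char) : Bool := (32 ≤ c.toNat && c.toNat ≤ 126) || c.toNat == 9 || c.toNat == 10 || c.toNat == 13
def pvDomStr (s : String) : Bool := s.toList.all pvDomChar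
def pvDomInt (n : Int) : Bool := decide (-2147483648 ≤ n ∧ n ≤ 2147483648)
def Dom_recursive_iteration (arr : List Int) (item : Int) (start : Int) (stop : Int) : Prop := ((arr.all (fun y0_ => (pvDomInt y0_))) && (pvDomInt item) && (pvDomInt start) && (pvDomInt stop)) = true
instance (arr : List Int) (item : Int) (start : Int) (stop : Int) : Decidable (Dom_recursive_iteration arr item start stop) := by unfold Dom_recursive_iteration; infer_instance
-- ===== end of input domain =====

-- B replaces the per-element recursion with a flat iterative loop over range(start, stop+1): simpler, O(1) stack.


-- ===== PORT A =====
-- literal port of A's recursion; 'none' on the pyGet? failure marks the IndexError, excluded by Pre_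
def recursive_iteration (arr : List Int) (item : Int) (start : Int) (stop : Int) : Option Int :=
  if start > stop then none
  else
    match PySem.List.pyGet? arr start with
    | none => none  -- Python raises IndexError here (outside Pre_)
    | some v =>
      if item = v then some start
      else recursive_iteration arr item (start + 1) stop
termination_by (stop + 1 - start).toNat
decreasing_by omega

-- ===== PORT B =====
-- the for-loop body of Source B over the materialised range list
def pvLoopB (arr : List Int) (item : Int) : List Int → Option Int
  | [] => none
  | i :: rest =>
    match PySem.List.pyGet? arr i with
    | none => none  -- Python raises IndexError here (outside Pre_)
    | some v => if v = item then some i else pvLoopB arr item rest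

def recursive_iteration_alt (arr : List Int) (item : Int) (start : Int) (stop : Int) : Option Int :=
  pvLoopB arr item (PySem.List.pyRange start (stop + 1) 1)

-- ===== PRECONDITION & SPEC =====
-- Pre_ excludes exactly the inputs on which Python A raises IndexError: some scanned index in
-- [start, stop] is out of range (after Python's negative-index rule) before any match is found.
def Pre_recursive_iteration (arr : List Int) (item : Int) (start : Int) (stop : Int) : Prop :=
  start > stop ∨
    (-(arr.length : Int) ≤ start ∧ start < (arr.length : Int) ∧
      (stop < (arr.length : Int) ∨
        ∃ j ∈ PySem.List.pyRange start (arr.length : Int) 1,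
          PySem.List.pyGet? arr j = some item))
instance (arr : List Int) (item : Int) (start : Int) (stop : Int) : Decidable (Pre_recursive_iteration arr item start stop) := by unfold Pre_recursive_iteration; infer_instance

def pvWitness_recursive_iteration : List Int × Int × Int × Int := ([5, 3, 7], 7, 0, 2)

def Spec_recursive_iteration (arr : List Int) (item : Int) (start : Int) (stop : Int) (out : Option Int) : Prop := out = recursive_iteration_alt arr item start stop
instance (arr : List Int) (item : Int) (start : Int) (stop : Int) (out : Option Int) : Decidable (Spec_recursive_iteration arr item start stop out) := by unfold Spec_recursive_iteration; infer_instance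

-- ===== CLAIM (what is proved, stated in full; the proofs are below) =====
def Claim_equal_recursive_iteration : Prop := ∀ (arr : List Int) (item : Int) (start : Int) (stop : Int), Dom_recursive_iteration arr item start stop → Pre_recursive_iteration arr item start stop → Spec_recursive_iteration arr item start stop (recursive_iteration arr item start stop)

-- ===== LEMMAS AND PROOFS =====
-- A's recursion equals B's loop over the range list, on every input (even outside Pre_:
-- both ports return none at the first failing index).
theorem rec_eq_loop (arr : List Int) (item : Int) (start stop : Int) :
    recursive_iteration arr item start stop =
      pvLoopB arr item (PySem.List.pyRange start (stop + 1) 1) := by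
  by_cases h : start > stop
  · rw [recursive_iteration, if_pos h,
      PySem.List.pyRange_one_eq_nil (by omega), pvLoopB]
  · rw [recursive_iteration, if_neg h,
      PySem.List.pyRange_one_cons (by omega), pvLoopB]
    cases hg : PySem.List.pyGet? arr start with
    | none => rfl
    | some v =>
      dsimp only
      by_cases he : item = v
      · simp [he]
      · rw [if_neg he, if_neg (fun hv => he hv.symm)]
        exact rec_eq_loop arr item (start + 1) stop
termination_by (stop + 1 - start).toNat
decreasing_by omega

-- ===== VERDICT (by name: the statement is the Claim_ definition above) =====
theorem recursive_iteration_spec : Claim_equal_recursive_iteration := by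
  intro arr item start stop _ _
  unfold Spec_recursive_iteration recursive_iteration_alt
  exact rec_eq_loop arr item start stop
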